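-- pv_equiv track=rewrite | github.com/chomu97/algorithm | programmers/progarmmers2019k_crane.py | solution
-- ===== SOURCE A (Python) =====
-- from collections import defaultdict
--
-- def solution(board, moves):
--     answer = 0
--     stack = []
--     board_dict = defaultdict(list)
--     for i in range(len(board)):
--         for data in board[::-1]:
--             if data[i] != 0:
--                 board_dict[i].append(data[i])
--     for move in moves:
--         if board_dict[move-1]:
--             p = board_dict[move-1].pop()
--             if not stack or stack[-1] != p:
--                 stack.append(p)
--             else:
--                 stack.pop()
--                 answer += 2
--     return answer
-- ===== SOURCE B (Python) =====
-- def solution(board, moves):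
--     n = len(board)
--     top = [0] * n          # per-column pointer: next row to inspect from the top
--     answer = 0
--     stack = []
--     for move in moves:
--         col = move - 1
--         if 0 <= col < n:
--             row = top[col]
--             while row < n and board[row][col] == 0:
--                 row += 1
--             if row < n:
--                 p = board[row][col]
--                 top[col] = row + 1
--                 if stack and stack[-1] == p:
--                     stack.pop()
--                     answer += 2
--                 else:
--                     stack.append(p)
--     return answer
-- ===== Notes on version B (the rewrite author's own statement) =====
-- stated objective: faster
-- what changed: B drops the defaultdict and the full O(n^2) preprocessing pass that builds every per-column stack up front; instead it keeps one top-pointer per column and lazily scans a column downward only when a move requests it, so only cells actually reached by moves are ever touched.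
import Mathlib
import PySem

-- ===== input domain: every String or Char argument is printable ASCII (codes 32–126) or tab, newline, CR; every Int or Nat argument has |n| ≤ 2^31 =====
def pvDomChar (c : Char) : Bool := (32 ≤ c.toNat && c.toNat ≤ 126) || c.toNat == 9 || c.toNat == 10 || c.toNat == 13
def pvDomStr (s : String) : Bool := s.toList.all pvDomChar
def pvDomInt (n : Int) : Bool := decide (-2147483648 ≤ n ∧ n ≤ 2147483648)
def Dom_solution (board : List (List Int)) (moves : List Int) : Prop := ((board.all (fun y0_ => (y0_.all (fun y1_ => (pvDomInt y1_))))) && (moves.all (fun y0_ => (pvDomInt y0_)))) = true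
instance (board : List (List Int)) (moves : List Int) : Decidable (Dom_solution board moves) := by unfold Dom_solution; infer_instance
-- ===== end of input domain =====

-- B replaces A's defaultdict-of-column-stacks preprocessing by per-column top pointers with lazy
-- downward scans, touching only cells that moves reach (measured faster). A mutates nothing observable; return values only.


-- ===== PORT A =====
-- Python lists used with append/pop-at-end (the stack and each board_dict value) are modeled
-- head-first: Lean head = Python last element, so append = cons and pop = uncons.
-- data[i] is PySem.List.pyGet? with default 0 — exact under Pre_solution (i < len(data) there);
-- board_dict is a defaultdict: reading board_dict[k] of a missing key yields [] (Dict.getD k []);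
-- the empty entry Python silently inserts then is never observable through these reads.
def solutionStepA (s : Int × List Int × PySem.Dict Int (List Int)) (move : Int) :
    Int × List Int × PySem.Dict Int (List Int) :=
  let (answer, stack, d) := s
  match d.getD (move - 1) [] with
  | [] => (answer, stack, d)                                  -- if board_dict[move-1] is empty: skip
  | p :: rest =>                                              -- p = board_dict[move-1].pop()
    let d' := d.insert (move - 1) rest
    match stack with
    | [] => (answer, [p], d')                                 -- not stack: append
    | q :: tl => if q ≠ p then (answer, p :: q :: tl, d')     -- stack[-1] != p: append
                 else (answer + 2, tl, d')                    -- else pop, answer += 2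

def solution (board : List (List Int)) (moves : List Int) : Int :=
  let d0 : PySem.Dict Int (List Int) :=
    (PySem.List.pyRange 0 (board.length : Int) 1).foldl (fun d i =>
      (((PySem.List.slice? board none none (-1)).getD []).foldl (fun d data =>   -- for data in board[::-1]
        let v := (PySem.List.pyGet? data i).getD 0
        if v ≠ 0 then d.insert i (v :: d.getD i []) else d) d)) PySem.Dict.empty
  (moves.foldl solutionStepA (0, [], d0)).1

-- ===== PORT B =====
-- the 'while row < n and board[row][col] == 0' scan of Source B, transcribed as recursion over the
-- remaining rows board.drop row; returns (value found, its row index) or none (column exhausted)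
def scanColB (c : Int) : List (List Int) → Nat → Option (Int × Nat)
  | [], _ => none
  | row :: rest, r =>
    let v := (PySem.List.pyGet? row c).getD 0
    if v ≠ 0 then some (v, r) else scanColB c rest (r + 1)

def solutionStepB (board : List (List Int)) (s : Int × List Int × List Nat) (move : Int) :
    Int × List Int × List Nat :=
  let (answer, stack, top) := s
  let col := move - 1
  if 0 ≤ col ∧ col < (board.length : Int) then
    let cn := col.toNat
    let r := top.getD cn 0
    match scanColB col (board.drop r) r with
    | none => (answer, stack, top)
    | some (p, r') =>
      let top' := top.set cn (r' + 1)
      match stack with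
      | q :: tl => if q = p then (answer + 2, tl, top') else (answer, p :: q :: tl, top')
      | [] => (answer, [p], top')
  else s

def solution_alt (board : List (List Int)) (moves : List Int) : Int :=
  (moves.foldl (solutionStepB board) (0, [], List.replicate board.length 0)).1

-- ===== PRECONDITION & SPEC =====
-- Pre_ excludes exactly the inputs on which Python A raises IndexError: a row shorter than the
-- number of rows (A reads data[i] for every i < len(board) in every row).
def Pre_solution (board : List (List Int)) (moves : List Int) : Prop :=
  ∀ row ∈ board, board.length ≤ row.length
instance (board : List (List Int)) (moves : List Int) : Decidable (Pre_solution board moves) := by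
  unfold Pre_solution; infer_instance
def pvWitness_solution : List (List Int) × List Int :=
  ([[0, 0, 3], [1, 2, 0], [1, 2, 3]], [1, 3, 2, 3, 1, 2, 5, 0])
def Spec_solution (board : List (List Int)) (moves : List Int) (out : Int) : Prop := out = solution_alt board moves
instance (board : List (List Int)) (moves : List Int) (out : Int) : Decidable (Spec_solution board moves out) := by unfold Spec_solution; infer_instance

-- ===== CLAIM (what is proved, stated in full; the proofs are below) =====
def Claim_equal_solution : Prop := ∀ (board : List (List Int)) (moves : List Int), Dom_solution board moves → Pre_solution board moves → Spec_solution board moves (solution board moves)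


-- ===== LEMMAS AND PROOFS =====
-- the (top-to-bottom) list of nonzero values of column c among the given rows
def colv (c : Int) (rows : List (List Int)) : List Int :=
  rows.filterMap (fun row =>
    let v := (PySem.List.pyGet? row c).getD 0
    if v ≠ 0 then some v else none)

-- A's inner preprocessing loop, on key i, prepends (colv i M).reverse and touches no other key
theorem innerFold_getD (i c : Int) (M : List (List Int)) :
    ∀ (d : PySem.Dict Int (List Int)),
    (M.foldl (fun d data =>
        let v := (PySem.List.pyGet? data i).getD 0
        if v ≠ 0 then d.insert i (v :: d.getD i []) else d) d).getD c []
    = if c = i then (colv i M).reverse ++ d.getD c [] else d.getD c [] := by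
  induction M with
  | nil => intro d; simp [colv]
  | cons row rest ih =>
    intro d
    simp only [List.foldl_cons]
    simp only [ih, colv, List.filterMap_cons]
    rcases eq_or_ne ((PySem.List.pyGet? row i).getD 0) 0 with hv | hv
    · simp [hv]
    · by_cases hc : c = i
      · subst hc; simp [hv, List.append_assoc]
      · simp [hv, hc, PySem.Dict.getD_insert]

-- A's outer preprocessing loop over distinct keys
theorem outerFold_getD (M : List (List Int)) :
    ∀ (ks : List Int) (d : PySem.Dict Int (List Int)), ks.Nodup →
    (∀ c ∈ ks, d.getD c [] = []) → ∀ (c : Int),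
    (ks.foldl (fun d i =>
      (M.foldl (fun d data =>
        let v := (PySem.List.pyGet? data i).getD 0
        if v ≠ 0 then d.insert i (v :: d.getD i []) else d) d)) d).getD c []
    = if c ∈ ks then (colv c M).reverse else d.getD c [] := by
  intro ks
  induction ks with
  | nil => intro d _ _ c; simp
  | cons k ks ih =>
    intro d hnd hz c
    have hk : k ∉ ks := (List.nodup_cons.mp hnd).1
    have hnd' : ks.Nodup := (List.nodup_cons.mp hnd).2
    simp only [List.foldl_cons]
    rw [ih _ hnd' (fun c' hc' => by
      rw [innerFold_getD]
      have hne : c' ≠ k := fun he => hk (he ▸ hc')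
      simp [hne, hz c' (List.mem_cons_of_mem _ hc')])]
    by_cases hm : c ∈ ks
    · simp [hm, List.mem_cons_of_mem _ hm]
    · rw [innerFold_getD]
      by_cases hck : c = k
      · subst hck
        simp [hm, hz c List.mem_cons_self]
      · simp [hm, hck, List.mem_cons]

-- B's downward scan pops exactly the head of the remaining column contents
theorem scan_spec (c : Int) (board : List (List Int)) :
    ∀ (L : List (List Int)) (r : Nat), board.drop r = L →
    (scanColB c L r = none → colv c L = []) ∧
    (∀ p r', scanColB c L r = some (p, r') →
      colv c L = p :: colv c (board.drop (r' + 1))) := by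
  intro L
  induction L with
  | nil =>
    intro r _
    exact ⟨fun _ => by simp [colv], fun p r' h => by simp [scanColB] at h⟩
  | cons row rest ih =>
    intro r hdrop
    have hrest : board.drop (r + 1) = rest := by
      have := List.drop_drop (i := 1) (j := r) (l := board)
      rw [hdrop] at this; simpa using this.symm
    constructor
    · intro hnone
      simp only [scanColB] at hnone
      rcases eq_or_ne ((PySem.List.pyGet? row c).getD 0) 0 with hv | hv
      · simp only [hv] at hnone
        simp only [colv, List.filterMap_cons]
        simp only [hv]
        simpa [colv] using (ih (r + 1) hrest).1 (by simpa [hv] using hnone)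
      · simp [hv] at hnone
    · intro p r' hsome
      simp only [scanColB] at hsome
      rcases eq_or_ne ((PySem.List.pyGet? row c).getD 0) 0 with hv | hv
      · have h2 := (ih (r + 1) hrest).2 p r' (by simpa [hv] using hsome)
        simp only [colv, List.filterMap_cons] at h2 ⊢
        simpa [hv] using h2
      · rw [if_pos hv] at hsome
        obtain ⟨hp, hr⟩ : (PySem.List.pyGet? row c).getD 0 = p ∧ r = r' := by
          simpa using hsome
        subst hp
        subst hr
        rw [hrest]
        simp [colv, hv]

-- simulation invariant between A's dict and B's top pointers
def RelDT (board : List (List Int)) (d : PySem.Dict Int (List Int)) (top : List Nat) : Prop :=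
  top.length = board.length ∧
  ∀ c : Int, d.getD c [] =
    if 0 ≤ c ∧ c < (board.length : Int) then colv c (board.drop (top.getD c.toNat 0)) else []

theorem step_sim (board : List (List Int)) (move ans : Int) (st : List Int)
    (d : PySem.Dict Int (List Int)) (top : List Nat) (h : RelDT board d top) :
    ∃ a' st' d' top', solutionStepA (ans, st, d) move = (a', st', d') ∧
      solutionStepB board (ans, st, top) move = (a', st', top') ∧ RelDT board d' top' := by
  obtain ⟨hlen, hinv⟩ := h
  by_cases hin : 0 ≤ move - 1 ∧ move - 1 < (board.length : Int)
  · have hd := hinv (move - 1)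
    rw [if_pos hin] at hd
    rcases hscan : scanColB (move - 1) (board.drop (top.getD (move - 1).toNat 0))
        (top.getD (move - 1).toNat 0) with _ | ⟨p, r'⟩
    · have hcv : colv (move - 1) (board.drop (top.getD (move - 1).toNat 0)) = [] :=
        (scan_spec _ board _ _ rfl).1 hscan
      refine ⟨ans, st, d, top, ?_, ?_, hlen, hinv⟩
      · simp only [solutionStepA]
        rw [hd, hcv]
      · simp only [solutionStepB]
        rw [if_pos hin, hscan]
    · have hcv := (scan_spec _ board _ _ rfl).2 p r' hscan
      have hcnlt : (move - 1).toNat < top.length := by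
        rw [hlen]; omega
      have hrel' : RelDT board (d.insert (move - 1) (colv (move - 1) (board.drop (r' + 1))))
          (top.set (move - 1).toNat (r' + 1)) := by
        refine ⟨by simp [hlen], fun c => ?_⟩
        by_cases hc : c = move - 1
        · subst hc
          rw [PySem.Dict.getD_insert_self, if_pos hin]
          simp only [List.getD]
          rw [List.getElem?_set_self hcnlt]
          rfl
        · rw [PySem.Dict.getD_insert_of_ne _ _ _ hc, hinv c]
          by_cases hcin : 0 ≤ c ∧ c < (board.length : Int)
          · rw [if_pos hcin, if_pos hcin]
            have hne : (move - 1).toNat ≠ c.toNat := by omega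
            simp only [List.getD]
            rw [List.getElem?_set_ne hne]
          · rw [if_neg hcin, if_neg hcin]
      rcases st with _ | ⟨q, tl⟩
      · refine ⟨ans, [p], _, _, ?_, ?_, hrel'⟩
        · simp only [solutionStepA]
          rw [hd, hcv]
        · simp only [solutionStepB]
          rw [if_pos hin, hscan]
      · by_cases hq : q = p
        · subst hq
          refine ⟨ans + 2, tl, _, _, ?_, ?_, hrel'⟩
          · simp only [solutionStepA]
            rw [hd, hcv]
            simp
          · simp only [solutionStepB]
            rw [if_pos hin, hscan]
            simp
        · refine ⟨ans, p :: q :: tl, _, _, ?_, ?_, hrel'⟩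
          · simp only [solutionStepA]
            rw [hd, hcv]
            simp [hq]
          · simp only [solutionStepB]
            rw [if_pos hin, hscan]
            simp [hq]
  · have hd := hinv (move - 1)
    rw [if_neg hin] at hd
    refine ⟨ans, st, d, top, ?_, ?_, hlen, hinv⟩
    · simp only [solutionStepA]
      rw [hd]
    · simp only [solutionStepB]
      rw [if_neg hin]

theorem fold_sim (board : List (List Int)) :
    ∀ (ms : List Int) (ans : Int) (st : List Int) (d : PySem.Dict Int (List Int)) (top : List Nat),
    RelDT board d top →
    (ms.foldl solutionStepA (ans, st, d)).1 = (ms.foldl (solutionStepB board) (ans, st, top)).1 := by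
  intro ms
  induction ms with
  | nil => intro ans st d top _; rfl
  | cons m ms ih =>
    intro ans st d top h
    obtain ⟨a', st', d', top', hA, hB, hrel⟩ := step_sim board m ans st d top h
    simp only [List.foldl_cons, hA, hB]
    exact ih a' st' d' top' hrel

-- ===== VERDICT (by name: the statement is the Claim_ definition above) =====
theorem solution_spec : Claim_equal_solution := by
  intro board moves _hdom _hpre
  simp only [Spec_solution]
  unfold solution solution_alt
  apply fold_sim
  refine ⟨by simp, fun c => ?_⟩
  rw [PySem.List.slice?_none_none_neg_one]
  simp only [Option.getD_some]
  rw [outerFold_getD board.reverse _ _ (PySem.List.nodup_pyRange_one 0 (board.length : Int))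
    (fun _ _ => by simp) c]
  by_cases hc : 0 ≤ c ∧ c < (board.length : Int)
  · rw [if_pos (PySem.List.mem_pyRange_one.mpr hc), if_pos hc]
    have h1 : colv c board.reverse = (colv c board).reverse := by
      simp [colv, List.filterMap_reverse]
    rw [h1, List.reverse_reverse]
    have h2 : (List.replicate board.length 0).getD c.toNat 0 = 0 := by
      simp only [List.getD, List.getElem?_replicate]
      split <;> rfl
    rw [h2, List.drop_zero]
  · rw [if_neg (fun hm => hc (PySem.List.mem_pyRange_one.mp hm)), if_neg hc]
    simp
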